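-- pv_equiv track=rewrite | github.com/diogomiguel93/toast-translator | tmdb.py | _pick_image_path
-- ===== SOURCE A (Python) =====
-- def _pick_image_path(items: list, prefer_langs: list[str]) -> tuple[str | None, str | None]:
--     if not items:
--         return None, None
--     for lang in prefer_langs:
--         for it in items:
--             iso = it.get('iso_639_1')
--             if (lang is None and iso is None) or (lang and iso and iso.lower() == lang.lower()):
--                 return it.get('file_path'), iso
--     return items[0].get('file_path'), items[0].get('iso_639_1')
-- ===== SOURCE B (Python) =====
-- def _pick_image_path(items: list, prefer_langs: list[str]) -> tuple[str | None, str | None]: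
--     if not items:
--         return None, None
--     # one pass: index the first item per language key (None for missing iso, lowered iso otherwise; empty iso matches nothing)
--     index = {}
--     for it in items:
--         iso = it.get('iso_639_1')
--         if iso is None:
--             key = None
--         elif iso:
--             key = iso.lower()
--         else:
--             continue
--         index.setdefault(key, it)
--     for lang in prefer_langs:
--         if lang is None:
--             key = None
--         elif lang:
--             key = lang.lower()
--         else:
--             continue
--         it = index.get(key)
--         if it is not None:
--             return it.get('file_path'), it.get('iso_639_1')
--     return items[0].get('file_path'), items[0].get('iso_639_1')
-- ===== Notes on version B (the rewrite author's own statement) =====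
-- stated objective: alternative
-- what changed: Replaces the nested langs-by-items scan with a single pass that builds a first-occurrence dict index keyed by normalized language, then one dict lookup per preferred language.
import Mathlib
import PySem

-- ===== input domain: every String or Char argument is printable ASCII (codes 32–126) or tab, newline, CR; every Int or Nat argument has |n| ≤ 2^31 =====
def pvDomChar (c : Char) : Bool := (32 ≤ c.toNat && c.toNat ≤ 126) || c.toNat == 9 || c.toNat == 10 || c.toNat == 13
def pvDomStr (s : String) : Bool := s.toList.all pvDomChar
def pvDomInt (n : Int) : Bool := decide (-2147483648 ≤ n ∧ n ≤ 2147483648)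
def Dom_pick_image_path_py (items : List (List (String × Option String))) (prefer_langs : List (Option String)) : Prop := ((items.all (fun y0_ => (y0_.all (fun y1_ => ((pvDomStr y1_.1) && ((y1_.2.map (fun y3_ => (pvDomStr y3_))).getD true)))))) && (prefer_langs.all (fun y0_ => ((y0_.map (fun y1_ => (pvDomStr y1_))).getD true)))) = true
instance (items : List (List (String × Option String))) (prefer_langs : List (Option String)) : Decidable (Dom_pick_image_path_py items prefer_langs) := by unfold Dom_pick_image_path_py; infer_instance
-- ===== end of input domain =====

-- B replaces A's nested langs-by-items scan with one indexing pass over items plus one dict lookup per preferred language (objective: alternative).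

-- ===== PORT A =====
-- it.get(k) on a Python dict `it` (default None for a missing key); shared by both ports
def pvGetA (it : List (String × Option String)) (k : String) : Option String :=
  (PySem.Dict.mk it).getD k none

-- the inner `for it in items` loop of A for one lang
def pickA_inner (lang : Option String) : List (List (String × Option String)) → Option (Option String × Option String)
  | [] => none
  | it :: rest =>
      let iso := pvGetA it "iso_639_1"
      let cond : Bool :=
        match lang, iso with
        | none, none => true
        | some l, some i => l != "" && i != "" && (PySem.Str.lower i == PySem.Str.lower l)
        | _, _ => false
      if cond then some (pvGetA it "file_path", iso) else pickA_inner lang rest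

-- the outer `for lang in prefer_langs` loop of A
def pickA_outer (items : List (List (String × Option String))) : List (Option String) → Option (Option String × Option String)
  | [] => none
  | lang :: rest =>
      match pickA_inner lang items with
      | some r => some r
      | none => pickA_outer items rest

def pick_image_path_py (items : List (List (String × Option String))) (prefer_langs : List (Option String)) : Option String × Option String :=
  match items with
  | [] => (none, none)
  | it0 :: _ =>
      match pickA_outer items prefer_langs with
      | some r => r
      | none => (pvGetA it0 "file_path", pvGetA it0 "iso_639_1")

-- ===== PORT B =====
-- one indexing pass: first item per normalized language key (setdefault keeps the first)
def pickB_index (items : List (List (String × Option String))) : PySem.Dict (Option String) (List (String × Option String)) :=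
  items.foldl
    (fun d it =>
      match pvGetA it "iso_639_1" with
      | none => d.setdefault none it
      | some iso => if iso == "" then d else d.setdefault (some (PySem.Str.lower iso)) it)
    PySem.Dict.empty

-- one lookup per preferred language
def pickB_lookup (idx : PySem.Dict (Option String) (List (String × Option String))) : List (Option String) → Option (Option String × Option String)
  | [] => none
  | lang :: rest =>
      let key : Option (Option String) :=
        match lang with
        | none => some none
        | some l => if l == "" then none else some (some (PySem.Str.lower l))
      match key with
      | none => pickB_lookup idx rest
      | some k =>
          match idx.get? k with
          | some it => some (pvGetA it "file_path", pvGetA it "iso_639_1")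
          | none => pickB_lookup idx rest

def pick_image_path_py_alt (items : List (List (String × Option String))) (prefer_langs : List (Option String)) : Option String × Option String :=
  match items with
  | [] => (none, none)
  | it0 :: _ =>
      match pickB_lookup (pickB_index items) prefer_langs with
      | some r => r
      | none => (pvGetA it0 "file_path", pvGetA it0 "iso_639_1")

-- ===== PRECONDITION & SPEC =====
def Spec_pick_image_path_py (items : List (List (String × Option String))) (prefer_langs : List (Option String)) (out : Option String × Option String) : Prop := out = pick_image_path_py_alt items prefer_langs
instance (items : List (List (String × Option String))) (prefer_langs : List (Option String)) (out : Option String × Option String) : Decidable (Spec_pick_image_path_py items prefer_langs out) := by unfold Spec_pick_image_path_py; infer_instance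

-- ===== CLAIM (what is proved, stated in full; the proofs are below) =====
def Claim_equal_pick_image_path_py : Prop := ∀ (items : List (List (String × Option String))) (prefer_langs : List (Option String)), Dom_pick_image_path_py items prefer_langs → Spec_pick_image_path_py items prefer_langs (pick_image_path_py items prefer_langs)

-- ===== LEMMAS AND PROOFS =====

-- normalized key of an item (none = item matches no language)
def pvKeyOf (it : List (String × Option String)) : Option (Option String) :=
  match pvGetA it "iso_639_1" with
  | none => some none
  | some iso => if iso == "" then none else some (some (PySem.Str.lower iso))

-- normalized key of a preferred language
def pvKeyFor (lang : Option String) : Option (Option String) :=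
  match lang with
  | none => some none
  | some l => if l == "" then none else some (some (PySem.Str.lower l))

theorem pickB_index_get? (items : List (List (String × Option String)))
    (d : PySem.Dict (Option String) (List (String × Option String))) (k : Option String) :
    (items.foldl
      (fun d it =>
        match pvGetA it "iso_639_1" with
        | none => d.setdefault none it
        | some iso => if iso == "" then d else d.setdefault (some (PySem.Str.lower iso)) it)
      d).get? k
      = (d.get? k).or ((items.find? (fun it => pvKeyOf it == some k)).map id) := by
  induction items generalizing d with
  | nil => simp
  | cons hd tl ih =>
    simp only [List.foldl_cons, List.find?]
    have hstep :
        (match pvGetA hd "iso_639_1" with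
          | none => d.setdefault none hd
          | some iso => if iso == "" then d else d.setdefault (some (PySem.Str.lower iso)) hd)
          = match pvKeyOf hd with
            | none => d
            | some k' => d.setdefault k' hd := by
      simp only [pvKeyOf]
      rcases h : pvGetA hd "iso_639_1" with _ | iso <;> simp
      split <;> simp
    rw [hstep]
    rcases hk : pvKeyOf hd with _ | k'
    · rw [ih]; simp
    · by_cases hkk : k' = k
      · subst hkk
        rw [ih]
        have hget : (d.setdefault k' hd).get? k' = some ((d.get? k').getD hd) :=
          PySem.Dict.get?_setdefault_self d k' hd
        rw [hget]
        cases hdv : d.get? k' <;> simp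
      · rw [ih]
        have hget : (d.setdefault k' hd).get? k = d.get? k := by
          by_cases hc : d.contains k' = true
          · rw [PySem.Dict.setdefault_of_contains d hd hc]
          · rw [PySem.Dict.setdefault_of_not_contains d hd (by simpa using hc)]
            exact PySem.Dict.get?_insert_of_ne d hd (fun h => hkk h.symm)
        rw [hget]
        have hb : (k' == k) = false := by simp [hkk]
        simp [hb]

-- A's predicate, re-expressed through the normalized keys
theorem pickA_cond_eq (lang : Option String) (iso : Option String) :
    (match lang, iso with
      | none, none => true
      | some l, some i => l != "" && i != "" && (PySem.Str.lower i == PySem.Str.lower l)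
      | _, _ => false)
      = match pvKeyFor lang with
        | none => false
        | some k => ((match iso with
            | none => some (none : Option String)
            | some s => if s == "" then none else some (some (PySem.Str.lower s))) == some k) := by
  rcases lang with _ | l
  · rcases iso with _ | i
    · simp [pvKeyFor]
    · simp only [pvKeyFor]
      split <;> simp
  · by_cases hl : l = ""
    · subst hl; rcases iso with _ | i <;> simp [pvKeyFor]
    · rcases iso with _ | i
      · simp [pvKeyFor, hl]
      · by_cases hi : i = ""
        · subst hi; simp [pvKeyFor, hl]
        · simp [pvKeyFor, hl, hi]

theorem pickA_inner_eq (lang : Option String) (items : List (List (String × Option String))) :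
    pickA_inner lang items
      = match pvKeyFor lang with
        | none => none
        | some k => (items.find? (fun it => pvKeyOf it == some k)).map
            (fun it => (pvGetA it "file_path", pvGetA it "iso_639_1")) := by
  induction items with
  | nil => rcases h : pvKeyFor lang with _ | k <;> simp [pickA_inner]
  | cons hd tl ih =>
    simp only [pickA_inner]
    rw [pickA_cond_eq lang (pvGetA hd "iso_639_1")]
    have hkey : (match pvGetA hd "iso_639_1" with
        | none => some (none : Option String)
        | some s => if s == "" then none else some (some (PySem.Str.lower s))) = pvKeyOf hd := rfl
    rw [hkey]
    rcases h : pvKeyFor lang with _ | k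
    · simpa [h] using ih
    · by_cases hp : (pvKeyOf hd == some k) = true
      · simp [List.find?, hp]
      · simp only [Bool.not_eq_true] at hp
        simp [List.find?, hp, ih, h]

theorem pickA_outer_eq (items : List (List (String × Option String))) (langs : List (Option String)) :
    pickA_outer items langs = pickB_lookup (pickB_index items) langs := by
  induction langs with
  | nil => rfl
  | cons lang rest ih =>
    simp only [pickA_outer, pickB_lookup]
    rw [pickA_inner_eq]
    have hkey : (match lang with
        | none => some (none : Option String)
        | some l => if l == "" then none else some (some (PySem.Str.lower l))) = pvKeyFor lang := rfl
    rw [hkey]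
    rcases h : pvKeyFor lang with _ | k
    · exact ih
    · have hidx : (pickB_index items).get? k
          = (items.find? (fun it => pvKeyOf it == some k)).map id := by
        simp only [pickB_index]
        rw [pickB_index_get? items PySem.Dict.empty k]
        simp
      rcases hf : items.find? (fun it => pvKeyOf it == some k) with _ | it
      · simp [hidx, hf, ih]
      · simp [hidx, hf]

-- ===== VERDICT (by name: the statement is the Claim_ definition above) =====
theorem pick_image_path_py_spec : Claim_equal_pick_image_path_py := by
  intro items prefer_langs _
  unfold Spec_pick_image_path_py pick_image_path_py pick_image_path_py_alt
  rcases items with _ | ⟨it0, tl⟩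
  · rfl
  · rw [pickA_outer_eq]
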